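-- pv_equiv track=rewrite | github.com/codemurt/hackathon-roscapstroy-urfo-2023-klukva | utils.py | concate
-- ===== SOURCE A (Python) =====
-- def concate(res, text):
--     f = res[0]
--     t = text[0]
--
--     tuxha = []
--     results = [res[0]]
--     for idx, elem in enumerate(res[1:], start=1):
--         if f == elem:
--             t += text[idx]
--         else:
--             f = elem
--             tuxha.append(t)
--             t = text[idx]
--             results.append(f)
--     tuxha.append(t)
--     return results, tuxha
-- ===== SOURCE B (Python) =====
-- def concate(res, text):
--     # Staged algorithm: first compute the cut positions (start indices of runs
--     # of equal labels), then build both outputs by slicing at those cuts.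
--     n = len(res)
--     cuts = [0] + [i for i in range(1, n) if res[i] != res[i - 1]] + [n]
--     results = [res[c] for c in cuts[:-1]]
--     tuxha = ["".join(text[a:b]) for a, b in zip(cuts, cuts[1:])]
--     return results, tuxha
-- ===== Notes on version B (the rewrite author's own statement) =====
-- stated objective: alternative
-- what changed: Instead of a single left-to-right pass maintaining four running accumulators (current label, growing string, results, tuxha), B works in stages: it first computes the list of cut positions (indices where the label changes) with a range filter, then builds the label list by indexing res at each cut and the text list by joining slices of text between adjacent cuts.
import Mathlib
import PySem

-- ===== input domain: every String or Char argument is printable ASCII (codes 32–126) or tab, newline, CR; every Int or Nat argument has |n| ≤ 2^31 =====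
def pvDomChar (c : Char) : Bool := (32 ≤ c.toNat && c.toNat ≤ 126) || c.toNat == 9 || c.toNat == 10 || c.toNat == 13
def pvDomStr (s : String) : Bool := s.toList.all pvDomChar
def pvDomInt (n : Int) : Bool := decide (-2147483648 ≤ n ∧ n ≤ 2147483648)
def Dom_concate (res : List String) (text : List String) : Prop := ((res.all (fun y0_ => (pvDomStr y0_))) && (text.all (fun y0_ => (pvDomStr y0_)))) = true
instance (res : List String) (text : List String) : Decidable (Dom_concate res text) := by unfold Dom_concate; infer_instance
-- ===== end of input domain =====

-- B replaces A's single accumulator pass by a staged algorithm: compute the cut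
-- positions (indices where the label changes) first, then build both outputs by
-- indexing/slicing at those cuts ('alternative', no speed claim).

-- ===== PORT A =====
def stepA (text : List String) (st : String × String × List String × List String)
    (p : Int × String) : String × String × List String × List String :=
  match st, p with
  | (f, t, tuxha, results), (idx, elem) =>
    if f == elem then
      (f, t ++ PySem.List.pyGetD text idx "", tuxha, results)
    else
      (elem, PySem.List.pyGetD text idx "", tuxha ++ [t], results ++ [elem])

def concate (res : List String) (text : List String) : List String × List String :=
  let f := PySem.List.pyGetD res 0 ""     -- res[0]  (Pre_ guarantees it is in range)
  let t := PySem.List.pyGetD text 0 ""    -- text[0] (Pre_ guarantees it is in range)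
  let st := (PySem.List.enumerate (PySem.List.slice res (some 1) none) 1).foldl
      (stepA text) (f, t, ([] : List String), [PySem.List.pyGetD res 0 ""])
  (st.2.2.2, st.2.2.1 ++ [st.2.1])

-- ===== PORT B =====
-- cuts = [0] + [i for i in range(1, n) if res[i] != res[i-1]] + [n]
def bnds (res : List String) : List Int :=
  (PySem.List.pyRange 1 (res.length : Int) 1).filter
    (fun i => !(PySem.List.pyGetD res i "" == PySem.List.pyGetD res (i - 1) ""))

def cutsOf (res : List String) : List Int := [0] ++ bnds res ++ [(res.length : Int)]

def concate_alt (res : List String) (text : List String) : List String × List String :=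
  let cuts := cutsOf res
  let results := (PySem.List.slice cuts none (some (-1))).map
      (fun c => PySem.List.pyGetD res c "")
  let tuxha := (cuts.zip (PySem.List.slice cuts (some 1) none)).map
      (fun ab => PySem.Str.join "" (PySem.List.slice text (some ab.1) (some ab.2)))
  (results, tuxha)

-- ===== PRECONDITION & SPEC =====
-- Pre_ excludes exactly the inputs on which A raises IndexError: empty res
-- (res[0]/text[0]) or text shorter than res (text[idx]).
def Pre_concate (res : List String) (text : List String) : Prop :=
  res ≠ [] ∧ res.length ≤ text.length
instance (res : List String) (text : List String) : Decidable (Pre_concate res text) := by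
  unfold Pre_concate; infer_instance

def pvWitness_concate : List String × List String := (["a", "a", "b"], ["x", "y", "z"])

def Spec_concate (res : List String) (text : List String) (out : List String × List String) : Prop := out = concate_alt res text
instance (res : List String) (text : List String) (out : List String × List String) : Decidable (Spec_concate res text out) := by unfold Spec_concate; infer_instance

-- ===== CLAIM (what is proved, stated in full; the proofs are below) =====
def Claim_equal_concate : Prop := ∀ (res : List String) (text : List String), Dom_concate res text → Pre_concate res text → Spec_concate res text (concate res text)

-- ===== LEMMAS AND PROOFS =====

-- ---- string join helpers ----
lemma intercalate_nil_eq_flatten (l : List (List Char)) :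
    ([] : List Char).intercalate l = l.flatten := by
  simp [List.intercalate]
  induction l with
  | nil => simp
  | cons a t ih => cases t <;> simp_all [List.intersperse]

lemma join_empty_eq (ps : List String) :
    PySem.Str.join "" ps = String.ofList (ps.map String.toList).flatten := by
  simp [PySem.Str.join, PySem.Chars.join, intercalate_nil_eq_flatten]

lemma join_empty_singleton (t : String) : PySem.Str.join "" [t] = t := by
  simp [join_empty_eq]

lemma join_empty_append (ps : List String) (t : String) :
    PySem.Str.join "" (ps ++ [t]) = PySem.Str.join "" ps ++ t := by
  simp [join_empty_eq]

lemma getLast?_cons_of_ne_nil {α : Type} (x : α) (l : List α) (h : l ≠ []) :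
    (x :: l).getLast? = l.getLast? := by
  cases l with
  | nil => exact absurd rfl h
  | cons b t => exact List.getLast?_cons_cons

-- ---- the mediating recursive grouping function (proof-side only) ----
def media : String → String → List (String × String) → List String × List String
  | f, t, [] => ([f], [t])
  | f, t, (r, s) :: ps =>
      if f == r then media f (t ++ s) ps
      else ((media r s ps).1.cons f, (media r s ps).2.cons t)

lemma media_ne_nil (ps : List (String × String)) (f t : String) :
    (media f t ps).1 ≠ [] ∧ (media f t ps).2 ≠ [] := by
  induction ps generalizing f t with
  | nil => simp [media]
  | cons p ps ih =>
    obtain ⟨r, s⟩ := p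
    by_cases h : f = r <;> simp [media, h, ih]

lemma media_append (ps : List (String × String)) (f t r s : String) :
    media f t (ps ++ [(r, s)]) =
      if (ps.map Prod.fst).getLastD f == r
      then ((media f t ps).1,
            (media f t ps).2.dropLast ++ [((media f t ps).2.getLast?.getD "") ++ s])
      else ((media f t ps).1 ++ [r], (media f t ps).2 ++ [s]) := by
  induction ps generalizing f t with
  | nil =>
    by_cases h : f = r <;> simp [media, h, beq_iff_eq]
  | cons p ps ih =>
    obtain ⟨r0, s0⟩ := p
    by_cases h : f = r0
    · subst h
      simp only [List.cons_append, media, beq_self_eq_true, if_pos, List.map_cons,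
        List.getLastD_cons]
      rw [ih]
    · have hb : (f == r0) = false := by simp [h]
      simp only [List.cons_append, media, hb, Bool.false_eq_true, if_false,
        List.map_cons, List.getLastD_cons]
      rw [ih]
      obtain ⟨h1, h2⟩ := media_ne_nil ps r0 s0
      split_ifs with hc
      · rw [List.dropLast_cons_of_ne_nil h2, getLast?_cons_of_ne_nil _ _ h2]
        simp
      · simp

-- ---- A's fold over (idx, elem) pairs equals a fold over zipped pairs ----
def step2 (st : String × String × List String × List String)
    (p : String × String) : String × String × List String × List String :=
  match st, p with
  | (f, t, tuxha, results), (r, s) =>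
    if f == r then (f, t ++ s, tuxha, results)
    else (r, s, tuxha ++ [t], results ++ [r])

lemma foldl_stepA_eq_step2 (text : List String) (rest : List String) :
    ∀ (k : Nat) (st : String × String × List String × List String),
    k + rest.length ≤ text.length →
    (PySem.List.enumerate rest (k : Int)).foldl (stepA text) st
      = (rest.zip (text.drop k)).foldl step2 st := by
  induction rest with
  | nil => intro k st _; simp [PySem.List.enumerate]
  | cons r rest ih =>
    intro k st hlen
    have hk : k < text.length := by simp at hlen; omega
    have hdrop : text.drop k = text[k] :: text.drop (k + 1) :=
      List.drop_eq_getElem_cons hk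
    have henum : PySem.List.enumerate (r :: rest) (k : Int)
        = ((k : Int), r) :: PySem.List.enumerate rest ((k + 1 : Nat) : Int) := by
      rw [PySem.List.enumerate_cons]; push_cast; ring_nf
    have hget : PySem.List.pyGetD text (k : Int) "" = text[k] := by
      rw [PySem.List.pyGetD_natCast]
      exact List.getD_eq_getElem _ _ hk
    rw [henum, hdrop]
    simp only [List.zip_cons_cons, List.foldl_cons]
    have hstep : stepA text st ((k : Int), r) = step2 st (r, text[k]) := by
      obtain ⟨f, t, u, rr⟩ := st
      simp [stepA, step2, hget]
    rw [hstep]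
    exact ih (k + 1) _ (by simp at hlen ⊢; omega)

-- ---- the zipped fold produces media's output ----
lemma foldl_step2_media (ps : List (String × String)) :
    ∀ (f t : String) (U P : List String),
    (let st := ps.foldl step2 (f, t, U, P ++ [f]);
     ((st.2.2.2 : List String), st.2.2.1 ++ [st.2.1]))
      = (P ++ (media f t ps).1, U ++ (media f t ps).2) := by
  induction ps with
  | nil => intro f t U P; simp [media]
  | cons p ps ih =>
    intro f t U P
    obtain ⟨r, s⟩ := p
    by_cases h : f = r
    · subst h
      simp only [List.foldl_cons, step2, beq_self_eq_true, if_pos, media]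
      exact ih f (t ++ s) U P
    · have hb : (f == r) = false := by simp [h]
      simp only [List.foldl_cons, step2, hb, Bool.false_eq_true, if_false, media]
      have := ih r s (U ++ [t]) (P ++ [f])
      simp only [List.append_assoc] at this ⊢
      rw [this]
      simp

-- ---- cuts-side facts ----
lemma pyGetD_append_lt (xs : List String) (x : String) (i : Int) (d : String)
    (h0 : 0 ≤ i) (h : i < xs.length) :
    PySem.List.pyGetD (xs ++ [x]) i d = PySem.List.pyGetD xs i d := by
  rw [PySem.List.pyGetD_eq_getElem (xs ++ [x]) d h0 (by simp; omega),
      PySem.List.pyGetD_eq_getElem xs d h0 (by exact_mod_cast h)]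
  exact List.getElem_append_left (by omega)

lemma mem_bnds_bound (res : List String) (c : Int) (hc : c ∈ bnds res) :
    1 ≤ c ∧ c < res.length := by
  unfold bnds at hc
  have := List.mem_filter.mp hc
  exact (PySem.List.mem_pyRange_one).mp this.1

lemma pyGetD_append_self (res : List String) (x : String) :
    PySem.List.pyGetD (res ++ [x]) (res.length : Int) "" = x := by
  rw [PySem.List.pyGetD_natCast]
  simp [List.getD_eq_getElem?_getD]

lemma bnds_append (res : List String) (x : String) (h : res ≠ []) :
    bnds (res ++ [x]) =
      bnds res ++ (if res.getLast h == x then [] else [(res.length : Int)]) := by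
  have hn : 0 < res.length := List.length_pos_iff.mpr h
  unfold bnds
  have hlen : (((res ++ [x]).length : Nat) : Int) = (res.length : Int) + 1 := by simp
  rw [hlen, PySem.List.pyRange_one_succ_right (by exact_mod_cast hn), List.filter_append]
  congr 1
  · apply List.filter_congr
    intro i hi
    obtain ⟨h1, h2⟩ := PySem.List.mem_pyRange_one.mp hi
    rw [pyGetD_append_lt res x i "" (by omega) h2,
        pyGetD_append_lt res x (i - 1) "" (by omega) (by omega)]
  · have hxa := pyGetD_append_self res x
    have hcast : ((res.length : Int) - 1) = ((res.length - 1 : Nat) : Int) := by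
      push_cast [hn]; omega
    have hxb : PySem.List.pyGetD (res ++ [x]) ((res.length : Int) - 1) ""
        = res.getLast h := by
      rw [hcast, pyGetD_append_lt res x _ "" (by positivity) (by exact_mod_cast (by omega : res.length - 1 < res.length))]
      rw [PySem.List.pyGetD_natCast, List.getD_eq_getElem _ _ (by omega)]
      exact (List.getLast_eq_getElem h).symm
    rw [List.filter_cons]
    simp only [hxa, hxb, List.filter_nil]
    by_cases hx : res.getLast h = x
    · simp [hx]
    · simp [beq_iff_eq, hx, Ne.symm hx]

lemma adjZip (l : List Int) (m : Int) (h : l ≠ []) :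
    (l ++ [m]).zip (l ++ [m]).tail = l.zip l.tail ++ [(l.getLast h, m)] := by
  induction l with
  | nil => exact absurd rfl h
  | cons a l ih =>
    cases l with
    | nil => simp
    | cons b l =>
      have := ih (by simp)
      simp only [List.cons_append, List.tail_cons, List.zip_cons_cons] at this ⊢
      rw [List.getLast_cons (by simp)]
      simp [this]

-- slice extension: text[c:n+1] = text[c:n] ++ [text[n]]
lemma slice_extend (text : List String) (c : Int) (n : Nat)
    (h0 : 0 ≤ c) (hcn : c ≤ (n : Int)) (hn : n < text.length) :
    PySem.List.slice text (some c) (some ((n : Int) + 1))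
      = PySem.List.slice text (some c) (some (n : Int)) ++ [text[n]] := by
  rw [PySem.List.slice_toNat text h0 (by positivity), PySem.List.slice_toNat text h0 (by omega)]
  rw [show ((n : Int) + 1).toNat = n + 1 from by omega,
      show ((n : Int)).toNat = n from by omega,
      show n + 1 - c.toNat = (n - c.toNat) + 1 from by omega,
      List.take_add_one]
  congr 1
  rw [List.getElem?_drop, show c.toNat + (n - c.toNat) = n from by omega]
  simp [List.getElem?_eq_getElem hn]

-- B-side recurrence: appending one (label, ...) element to res
set_option maxHeartbeats 1000000 in
lemma concate_alt_append (res : List String) (x : String) (text : List String)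
    (h : res ≠ []) (hlen : res.length < text.length) :
    concate_alt (res ++ [x]) text =
      if (res.getLast h) == x
      then ((concate_alt res text).1,
            (concate_alt res text).2.dropLast
              ++ [((concate_alt res text).2.getLast?.getD "") ++ text[res.length]])
      else ((concate_alt res text).1 ++ [x],
            (concate_alt res text).2 ++ [text[res.length]]) := by
  have hn : 0 < res.length := List.length_pos_iff.mpr h
  have hg : ∀ c ∈ 0 :: bnds res,
      PySem.List.pyGetD (res ++ [x]) c "" = PySem.List.pyGetD res c "" := by
    intro c hc
    rcases List.mem_cons.mp hc with rfl | hc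
    · exact pyGetD_append_lt res x 0 "" le_rfl (by exact_mod_cast hn)
    · obtain ⟨h1, h2⟩ := mem_bnds_bound res c hc
      exact pyGetD_append_lt res x c "" (by omega) h2
  have hbound : ∀ c ∈ 0 :: bnds res, 0 ≤ c ∧ c < (res.length : Int) := by
    intro c hc
    rcases List.mem_cons.mp hc with rfl | hc
    · exact ⟨le_rfl, by exact_mod_cast hn⟩
    · obtain ⟨h1, h2⟩ := mem_bnds_bound res c hc
      exact ⟨by omega, h2⟩
  have hcuts : cutsOf res = (0 :: bnds res) ++ [(res.length : Int)] := by
    simp [cutsOf]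
  have hcuts' : cutsOf (res ++ [x])
      = (0 :: (bnds res ++ (if res.getLast h == x then [] else [(res.length : Int)])))
        ++ [(res.length : Int) + 1] := by
    simp [cutsOf, bnds_append res x h]
  unfold concate_alt
  simp only [PySem.List.slice_to_neg_one, PySem.List.slice_from_one, hcuts, hcuts']
  by_cases hx : res.getLast h = x
  · simp only [hx, beq_self_eq_true, if_pos, List.append_nil]
    refine Prod.ext ?_ ?_
    · simp only [List.dropLast_concat]
      exact List.map_congr_left hg
    · have hz1 := adjZip (0 :: bnds res) ((res.length : Int) + 1) (by simp)
      have hz2 := adjZip (0 :: bnds res) (res.length : Int) (by simp)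
      simp only at hz1 hz2 ⊢
      rw [hz1, hz2]
      simp only [List.map_append, List.map_cons, List.map_nil]
      rw [List.dropLast_concat, List.getLast?_concat, List.append_right_inj]
      obtain ⟨hc0, hc1⟩ := hbound _ (List.getLast_mem (l := 0 :: bnds res) (by simp))
      simp only [Option.getD_some]
      rw [slice_extend text _ res.length hc0 (by omega) (by omega),
          join_empty_append]
  · have hxb : (res.getLast h == x) = false := by simp [hx]
    simp only [hxb, Bool.false_eq_true, if_false]
    have hassoc : (0 :: (bnds res ++ [(res.length : Int)]))
        = (0 :: bnds res) ++ [(res.length : Int)] := by simp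
    rw [hassoc]
    refine Prod.ext ?_ ?_
    · rw [List.dropLast_concat, List.dropLast_concat, List.map_append,
          List.map_congr_left hg]
      simp [pyGetD_append_self res x]
    · have hz1 := adjZip ((0 :: bnds res) ++ [(res.length : Int)])
          ((res.length : Int) + 1) (by simp)
      have hz2 := adjZip (0 :: bnds res) (res.length : Int) (by simp)
      simp only at hz1 hz2 ⊢
      rw [hz1, hz2]
      simp only [List.map_append, List.map_cons, List.map_nil, List.append_assoc,
        List.getLast_append_singleton]
      rw [List.append_right_inj, List.append_right_inj]
      rw [slice_extend text (res.length : Int) res.length (by positivity) le_rfl (by omega)]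
      rw [PySem.List.slice_toNat text (by positivity) (by positivity)]
      simp [join_empty_singleton]

lemma getLast_cons_eq_getLastD {α : Type} (f0 : α) (rs : List α) :
    (f0 :: rs).getLast (by simp) = rs.getLastD f0 := by
  induction rs generalizing f0 with
  | nil => rfl
  | cons b l ih =>
    rw [List.getLast_cons (by simp), ih b, List.getLastD_cons]

lemma zip_append_singleton_left {α β : Type} (l1 : List α) (x : α) (l2 : List β)
    (h : l1.length < l2.length) :
    (l1 ++ [x]).zip l2 = l1.zip l2 ++ [(x, l2[l1.length])] := by
  induction l1 generalizing l2 with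
  | nil =>
    cases l2 with
    | nil => simp at h
    | cons b t => simp
  | cons a l ihl =>
    cases l2 with
    | nil => simp at h
    | cons b t =>
      simp only [List.cons_append, List.zip_cons_cons]
      rw [ihl t (by simpa using h)]
      simp

-- B equals media
lemma concate_alt_eq_media (rest : List String) (f0 : String) (text : List String)
    (hlen : rest.length + 1 ≤ text.length) :
    concate_alt (f0 :: rest) text
      = media f0 (PySem.List.pyGetD text 0 "") (rest.zip (text.drop 1)) := by
  revert hlen
  induction rest using List.reverseRecOn with
  | nil =>
    intro hlen
    obtain ⟨t0, tt, rfl⟩ : ∃ t0 tt, text = t0 :: tt := by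
      cases text with
      | nil => simp at hlen
      | cons a l => exact ⟨a, l, rfl⟩
    have hb : bnds [f0] = [] := by
      unfold bnds
      simp [PySem.List.pyRange_one_eq_nil]
    have hc : cutsOf [f0] = [0, 1] := by
      unfold cutsOf
      rw [hb]; simp
    unfold concate_alt
    rw [hc]
    simp only [PySem.List.slice_to_neg_one, PySem.List.slice_from_one,
      List.dropLast, List.tail_cons,
      List.zip_cons_cons, List.zip_nil_right, List.map_cons, List.map_nil]
    rw [PySem.List.slice_toNat (t0 :: tt) (by norm_num) (by norm_num)]
    simp [media, join_empty_singleton]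
  | append_singleton rs x ih =>
    intro hlen
    have hlen' : rs.length + 1 < text.length := by simp at hlen; omega
    have hdlen : rs.length < (text.drop 1).length := by simp; omega
    rw [show f0 :: (rs ++ [x]) = (f0 :: rs) ++ [x] from rfl]
    rw [concate_alt_append (f0 :: rs) x text (by simp) (by simpa using hlen')]
    rw [ih (by omega)]
    rw [zip_append_singleton_left rs x (text.drop 1) hdlen]
    rw [media_append]
    have hmf : (rs.zip (text.drop 1)).map Prod.fst = rs :=
      List.map_fst_zip (by omega)
    have hgl : (f0 :: rs).getLast (by simp) = rs.getLastD f0 := getLast_cons_eq_getLastD f0 rs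
    have hget : (text.drop 1)[rs.length] = text[(f0 :: rs).length] := by
      rw [List.getElem_drop]
      congr 1
      simp [Nat.add_comm]
    rw [hmf, hgl, hget]
    rfl

-- ===== VERDICT (by name: the statement is the Claim_ definition above) =====
theorem concate_spec : Claim_equal_concate := by
  intro res text _ hpre
  obtain ⟨hne, hlen⟩ := hpre
  obtain ⟨f0, rest, rfl⟩ : ∃ f0 rest, res = f0 :: rest := by
    cases res with
    | nil => exact absurd rfl hne
    | cons a l => exact ⟨a, l, rfl⟩
  obtain ⟨t0, ttail, rfl⟩ : ∃ t0 ttail, text = t0 :: ttail := by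
    cases text with
    | nil => simp at hlen
    | cons a l => exact ⟨a, l, rfl⟩
  show concate _ _ = concate_alt _ _
  unfold concate
  simp only [PySem.List.pyGetD_zero_cons, PySem.List.slice_from_one, List.tail_cons]
  have hs := foldl_stepA_eq_step2 (t0 :: ttail) rest 1 (f0, t0, [], [f0])
      (by simp at hlen ⊢; omega)
  rw [show ((1 : Nat) : Int) = (1 : Int) by norm_num] at hs
  rw [hs]
  have hm := foldl_step2_media (rest.zip ((t0 :: ttail).drop 1)) f0 t0 [] []
  simp only [List.nil_append] at hm
  rw [hm]
  rw [concate_alt_eq_media rest f0 (t0 :: ttail) (by simp at hlen ⊢; omega)]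
  simp
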